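-- pv_equiv track=rewrite | github.com/AnonymousAuthor0856/ArkTrans | scripts/swift2ets/tree_swift.py | _split_modifier_chain
-- ===== SOURCE A (Python) =====
-- def _split_modifier_chain(raw_text: str):
--     """Split chained modifiers safely, handling nested parentheses and braces."""
--     mods = []
--     buf = []
--     depth_paren = 0
--     depth_brace = 0
--
--     i = 0
--     while i < len(raw_text):
--         ch = raw_text[i]
--         if ch == "(":
--             depth_paren += 1
--         elif ch == ")":
--             depth_paren = max(0, depth_paren - 1)
--         elif ch == "{":
--             depth_brace += 1
--         elif ch == "}":
--             depth_brace = max(0, depth_brace - 1)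
--
--         if ch == "." and depth_paren == 0 and depth_brace == 0:
--             s = "".join(buf).strip()
--             if s:
--                 mods.append(s)
--             buf = ["."]
--         else:
--             buf.append(ch)
--         i += 1
--
--     tail = "".join(buf).strip()
--     if tail:
--         mods.append(tail)
--
--     return [m for m in mods if m.startswith(".")]
-- ===== SOURCE B (Python) =====
-- def _split_modifier_chain(raw_text: str):
--     """Two-pass split: record the indices of top-level '.' cut points, then
--     slice the string between consecutive cut points and strip each slice."""
--     cuts = []
--     depth_paren = 0
--     depth_brace = 0
--     for i, ch in enumerate(raw_text):
--         if ch == "(":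
--             depth_paren += 1
--         elif ch == ")":
--             depth_paren = max(0, depth_paren - 1)
--         elif ch == "{":
--             depth_brace += 1
--         elif ch == "}":
--             depth_brace = max(0, depth_brace - 1)
--         elif ch == "." and depth_paren == 0 and depth_brace == 0:
--             cuts.append(i)
--     cuts.append(len(raw_text))
--     return [raw_text[a:b].strip() for a, b in zip(cuts, cuts[1:])]
-- ===== Notes on version B (the rewrite author's own statement) =====
-- stated objective: faster
-- what changed: A accumulates a per-character buffer and emits stripped segments while scanning; B separates boundary-finding from extraction: one pass records the indices of top-level dot cut points, a second pass slices the string between consecutive cut points and strips each slice (the leading-prefix bookkeeping and the final startswith filter disappear).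
import Mathlib
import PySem

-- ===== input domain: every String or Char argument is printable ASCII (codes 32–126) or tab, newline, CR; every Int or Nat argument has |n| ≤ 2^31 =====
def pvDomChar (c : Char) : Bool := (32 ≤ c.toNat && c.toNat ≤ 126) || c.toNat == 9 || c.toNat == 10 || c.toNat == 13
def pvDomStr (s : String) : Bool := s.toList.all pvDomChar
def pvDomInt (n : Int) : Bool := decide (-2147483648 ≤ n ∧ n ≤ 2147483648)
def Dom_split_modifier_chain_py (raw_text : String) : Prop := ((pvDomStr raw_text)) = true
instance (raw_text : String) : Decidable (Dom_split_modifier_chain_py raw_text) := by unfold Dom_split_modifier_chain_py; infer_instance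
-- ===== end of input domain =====

-- B re-decomposes A's single buffered scan into boundary-finding (the indices of top-level dots)
-- plus slice-and-strip extraction; a timing run measured B faster by a constant factor
-- (bulk slicing instead of per-character buffer appends and joins).

-- ===== PORT A =====
-- A's while-loop: state (mods, buf, depth_paren, depth_brace), returns the final (mods, buf).
def pvALoop : List Char → List (List Char) → List Char → Int → Int → List (List Char) × List Char
  | [], mods, buf, _, _ => (mods, buf)
  | ch :: rest, mods, buf, depth_paren, depth_brace =>
    let dpb : Int × Int :=
      if ch = '(' then (depth_paren + 1, depth_brace)
      else if ch = ')' then (max 0 (depth_paren - 1), depth_brace)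
      else if ch = '{' then (depth_paren, depth_brace + 1)
      else if ch = '}' then (depth_paren, max 0 (depth_brace - 1))
      else (depth_paren, depth_brace)
    if ch = '.' ∧ dpb.1 = 0 ∧ dpb.2 = 0 then
      let s := PySem.Chars.strip buf
      pvALoop rest (if s ≠ [] then mods ++ [s] else mods) ['.'] dpb.1 dpb.2
    else
      pvALoop rest mods (buf ++ [ch]) dpb.1 dpb.2

def split_modifier_chain_py (raw_text : String) : List String :=
  let r := pvALoop raw_text.toList [] [] 0 0
  let tail := PySem.Chars.strip r.2
  let mods := if tail ≠ [] then r.1 ++ [tail] else r.1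
  (mods.filter (fun m => PySem.Chars.startswith m ['.'])).map String.ofList

-- ===== PORT B =====
-- B's first pass: fold over enumerate(raw_text), collecting indices of top-level '.'.
def pvBCuts : List (Int × Char) → Int → Int → List Int
  | [], _, _ => []
  | (i, ch) :: rest, depth_paren, depth_brace =>
    if ch = '(' then pvBCuts rest (depth_paren + 1) depth_brace
    else if ch = ')' then pvBCuts rest (max 0 (depth_paren - 1)) depth_brace
    else if ch = '{' then pvBCuts rest depth_paren (depth_brace + 1)
    else if ch = '}' then pvBCuts rest depth_paren (max 0 (depth_brace - 1))
    else if ch = '.' ∧ depth_paren = 0 ∧ depth_brace = 0 then i :: pvBCuts rest depth_paren depth_brace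
    else pvBCuts rest depth_paren depth_brace

def split_modifier_chain_py_alt (raw_text : String) : List String :=
  let cs := raw_text.toList
  let cuts := pvBCuts (PySem.List.enumerate cs 0) 0 0 ++ [(cs.length : Int)]
  (cuts.zip cuts.tail).map (fun p =>
    String.ofList (PySem.Chars.strip (PySem.List.slice cs (some p.1) (some p.2))))

-- ===== PRECONDITION & SPEC =====
def Spec_split_modifier_chain_py (raw_text : String) (out : List String) : Prop := out = split_modifier_chain_py_alt raw_text
instance (raw_text : String) (out : List String) : Decidable (Spec_split_modifier_chain_py raw_text out) := by unfold Spec_split_modifier_chain_py; infer_instance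

-- ===== CLAIM (what is proved, stated in full; the proofs are below) =====
def Claim_equal_split_modifier_chain_py : Prop := ∀ (raw_text : String), Dom_split_modifier_chain_py raw_text → Spec_split_modifier_chain_py raw_text (split_modifier_chain_py raw_text)

-- ===== LEMMAS AND PROOFS =====

-- Common skeleton: (prefix chunk before the first top-level '.', list of raw '.'-segments).
def pvGo : List Char → Int → Int → List Char × List (List Char)
  | [], _, _ => ([], [])
  | ch :: rest, dp, db =>
    if ch = '(' then let r := pvGo rest (dp + 1) db; (ch :: r.1, r.2)
    else if ch = ')' then let r := pvGo rest (max 0 (dp - 1)) db; (ch :: r.1, r.2)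
    else if ch = '{' then let r := pvGo rest dp (db + 1); (ch :: r.1, r.2)
    else if ch = '}' then let r := pvGo rest dp (max 0 (db - 1)); (ch :: r.1, r.2)
    else if ch = '.' ∧ dp = 0 ∧ db = 0 then let r := pvGo rest dp db; ([], ('.' :: r.1) :: r.2)
    else let r := pvGo rest dp db; (ch :: r.1, r.2)

def pvEmit (buf : List Char) : List (List Char) :=
  if PySem.Chars.strip buf ≠ [] then [PySem.Chars.strip buf] else []

def pvStarts : Int → List (List Char) → List Int
  | _, [] => []
  | i, s :: ss => i :: pvStarts (i + (s.length : Int)) ss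

theorem pvGo_decomp (cs : List Char) (dp db : Int) :
    cs = (pvGo cs dp db).1 ++ (pvGo cs dp db).2.flatten := by
  induction cs generalizing dp db with
  | nil => simp [pvGo]
  | cons ch rest ih =>
    simp only [pvGo]
    split_ifs with h1 h2 h3 h4 h5 <;> simp <;>
      first | exact ih _ _ | exact ⟨h5.1, ih _ _⟩

theorem pvGo_segs_dot (cs : List Char) (dp db : Int) :
    ∀ s ∈ (pvGo cs dp db).2, ∃ t, s = '.' :: t := by
  induction cs generalizing dp db with
  | nil => simp [pvGo]
  | cons ch rest ih =>
    simp only [pvGo]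
    split_ifs with h1 h2 h3 h4 h5
    · exact ih _ _
    · exact ih _ _
    · exact ih _ _
    · exact ih _ _
    · intro s hs
      simp only [List.mem_cons] at hs
      rcases hs with rfl | hs
      · exact ⟨_, rfl⟩
      · exact ih _ _ s hs
    · exact ih _ _

theorem pvEmit_append (m : List (List Char)) (b : List Char) :
    (if PySem.Chars.strip b ≠ [] then m ++ [PySem.Chars.strip b] else m) = m ++ pvEmit b := by
  unfold pvEmit; split_ifs <;> simp

theorem pvALoop_go (cs : List Char) (mods : List (List Char)) (buf : List Char) (dp db : Int) :
    (pvALoop cs mods buf dp db).1 ++ pvEmit (pvALoop cs mods buf dp db).2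
      = mods ++ pvEmit (buf ++ (pvGo cs dp db).1) ++ ((pvGo cs dp db).2.map pvEmit).flatten := by
  induction cs generalizing mods buf dp db with
  | nil => simp [pvALoop, pvGo]
  | cons ch rest ih =>
    simp only [pvALoop, pvGo]
    by_cases h1 : ch = '('
    · simp [h1, ih, List.append_assoc]
    · by_cases h2 : ch = ')'
      · simp [h2, ih, List.append_assoc]
      · by_cases h3 : ch = '{'
        · simp [h3, ih, List.append_assoc]
        · by_cases h4 : ch = '}'
          · simp [h4, ih, List.append_assoc]
          · by_cases h5 : ch = '.' ∧ dp = 0 ∧ db = 0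
            · obtain ⟨hc, hd, hb⟩ := h5
              subst hc; subst hd; subst hb
              simp only [Char.reduceEq, if_false, if_true, and_self]
              rw [pvEmit_append, ih]
              simp [List.append_assoc]
            · simp [h1, h2, h3, h4, h5, ih, List.append_assoc]

theorem pvBCuts_go (cs : List Char) (i dp db : Int) :
    pvBCuts (PySem.List.enumerate cs i) dp db
      = pvStarts (i + ((pvGo cs dp db).1.length : Int)) (pvGo cs dp db).2 := by
  induction cs generalizing i dp db with
  | nil => simp [pvBCuts, pvGo, PySem.List.enumerate_nil, pvStarts]
  | cons ch rest ih =>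
    rw [PySem.List.enumerate_cons]
    simp only [pvBCuts, pvGo]
    by_cases h1 : ch = '('
    · subst h1
      simp only [Char.reduceEq, reduceIte]
      rw [ih]; congr 1 <;> first | rfl | (push_cast [List.length_cons]; omega)
    · by_cases h2 : ch = ')'
      · subst h2
        simp only [Char.reduceEq, reduceIte]
        rw [ih]; congr 1 <;> first | rfl | (push_cast [List.length_cons]; omega)
      · by_cases h3 : ch = '{'
        · subst h3
          simp only [Char.reduceEq, reduceIte]
          rw [ih]; congr 1 <;> first | rfl | (push_cast [List.length_cons]; omega)
        · by_cases h4 : ch = '}'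
          · subst h4
            simp only [Char.reduceEq, reduceIte]
            rw [ih]; congr 1 <;> first | rfl | (push_cast [List.length_cons]; omega)
          · rw [if_neg h1, if_neg h2, if_neg h3, if_neg h4, if_neg h1, if_neg h2, if_neg h3,
              if_neg h4]
            by_cases h5 : ch = '.' ∧ dp = 0 ∧ db = 0
            · rw [if_pos h5, if_pos h5, ih]
              simp only [pvStarts, List.length_nil, List.length_cons]
              congr 2 <;> first | rfl | (push_cast [List.length_cons]; omega)
            · rw [if_neg h5, if_neg h5, ih]
              congr 1 <;> first | rfl | (push_cast [List.length_cons]; omega)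

theorem pvSlices (segs : List (List Char)) (pre : List Char) :
    (((pvStarts (pre.length : Int) segs ++ [((pre ++ segs.flatten).length : Int)]).zip
       (pvStarts (pre.length : Int) segs ++ [((pre ++ segs.flatten).length : Int)]).tail).map
        (fun p => PySem.List.slice (pre ++ segs.flatten) (some p.1) (some p.2))) = segs := by
  induction segs generalizing pre with
  | nil => simp [pvStarts]
  | cons s ss ih =>
    cases ss with
    | nil =>
      simp only [pvStarts, List.flatten_cons, List.flatten_nil, List.append_nil, List.nil_append,
        List.zip_cons_cons, List.tail_cons, List.zip_nil_right, List.map_cons, List.map_nil,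
        List.cons_append]
      rw [PySem.List.slice_natCast]
      simp [List.length_append]
    | cons s' ss' =>
      have hih := ih (pre ++ s)
      simp only [pvStarts, List.flatten_cons, List.length_append, List.cons_append,
        List.zip_cons_cons, List.tail_cons, List.map_cons] at hih ⊢
      push_cast at hih ⊢
      rw [List.append_assoc] at hih
      simp only [add_assoc] at hih ⊢
      refine List.cons_eq_cons.mpr ⟨?_, hih⟩
      rw [PySem.List.slice_natCast_add, List.drop_left, List.take_left]

theorem pvStrip_cons_space (c : Char) (t : List Char) (h : PySem.Chars.isspace c = true) :
    PySem.Chars.strip (c :: t) = PySem.Chars.strip t := by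
  simp [PySem.Chars.strip, PySem.Chars.lstrip, h]

theorem pvStrip_cons_nonspace (c : Char) (t : List Char) (h : PySem.Chars.isspace c = false) :
    ∃ r, PySem.Chars.strip (c :: t) = c :: r := by
  simp only [PySem.Chars.strip, PySem.Chars.lstrip, PySem.Chars.rstrip, List.dropWhile_cons, h,
    Bool.false_eq_true, if_false, List.reverse_cons]
  rw [List.dropWhile_append]
  by_cases he : (t.reverse.dropWhile PySem.Chars.isspace).isEmpty
  · simp [he, h]
  · simp [he]

theorem pvPrefix_no_dot (cs : List Char) :
    PySem.Chars.startswith (PySem.Chars.strip (pvGo cs 0 0).1) ['.'] = false := by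
  induction cs with
  | nil => simp [pvGo, PySem.Chars.strip, PySem.Chars.lstrip, PySem.Chars.rstrip,
      PySem.Chars.startswith]
  | cons ch rest ih =>
    simp only [pvGo]
    by_cases h1 : ch = '('
    · subst h1; simp only [Char.reduceEq, reduceIte]
      obtain ⟨r, hr⟩ := pvStrip_cons_nonspace '(' (pvGo rest (0 + 1) 0).1 (by decide)
      rw [hr]; simp [PySem.Chars.startswith, List.isPrefixOf]
    · by_cases h2 : ch = ')'
      · subst h2; simp only [Char.reduceEq, reduceIte]
        obtain ⟨r, hr⟩ := pvStrip_cons_nonspace ')' (pvGo rest (max 0 (0 - 1)) 0).1 (by decide)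
        rw [hr]; simp [PySem.Chars.startswith, List.isPrefixOf]
      · by_cases h3 : ch = '{'
        · subst h3; simp only [Char.reduceEq, reduceIte]
          obtain ⟨r, hr⟩ := pvStrip_cons_nonspace '{' (pvGo rest 0 (0 + 1)).1 (by decide)
          rw [hr]; simp [PySem.Chars.startswith, List.isPrefixOf]
        · by_cases h4 : ch = '}'
          · subst h4; simp only [Char.reduceEq, reduceIte]
            obtain ⟨r, hr⟩ := pvStrip_cons_nonspace '}' (pvGo rest 0 (max 0 (0 - 1))).1 (by decide)
            rw [hr]; simp [PySem.Chars.startswith, List.isPrefixOf]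
          · rw [if_neg h1, if_neg h2, if_neg h3, if_neg h4]
            by_cases h5 : ch = '.'
            · rw [if_pos (show _ by exact ⟨h5, by simp⟩)]
              simp [PySem.Chars.strip, PySem.Chars.lstrip, PySem.Chars.rstrip,
                PySem.Chars.startswith]
            · rw [if_neg (by simp [h5])]
              by_cases hsp : PySem.Chars.isspace ch = true
              · rw [pvStrip_cons_space ch _ hsp]; exact ih
              · obtain ⟨r, hr⟩ := pvStrip_cons_nonspace ch (pvGo rest 0 0).1
                  (by simpa using hsp)
                rw [hr]
                simp [PySem.Chars.startswith, List.isPrefixOf, Ne.symm h5]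

theorem pvFilter_emit_segs (segs : List (List Char)) (hd : ∀ s ∈ segs, ∃ t, s = '.' :: t) :
    ((segs.map pvEmit).flatten.filter (fun m => PySem.Chars.startswith m ['.']))
      = segs.map PySem.Chars.strip := by
  induction segs with
  | nil => simp
  | cons s ss ih =>
    obtain ⟨t, rfl⟩ := hd s (by simp)
    obtain ⟨r, hr⟩ := pvStrip_cons_nonspace '.' t (by decide)
    simp only [List.map_cons, List.flatten_cons, List.filter_append, pvEmit, hr]
    simp only [ne_eq, reduceCtorEq, not_false_iff, if_true]
    rw [ih (fun u hu => hd u (by simp [hu]))]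
    simp [PySem.Chars.startswith, List.isPrefixOf]

-- ===== VERDICT (by name: the statement is the Claim_ definition above) =====
theorem split_modifier_chain_py_spec : Claim_equal_split_modifier_chain_py := by
  intro raw_text _
  show split_modifier_chain_py raw_text = split_modifier_chain_py_alt raw_text
  have hsegdot := pvGo_segs_dot raw_text.toList 0 0
  have hA : split_modifier_chain_py raw_text
      = ((pvGo raw_text.toList 0 0).2.map PySem.Chars.strip).map String.ofList := by
    simp only [split_modifier_chain_py]
    rw [pvEmit_append, pvALoop_go]
    simp only [List.nil_append, List.filter_append]
    rw [pvFilter_emit_segs _ hsegdot]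
    have hpre := pvPrefix_no_dot raw_text.toList
    unfold pvEmit
    split_ifs with h
    · simp [hpre]
    · simp
  have hB : split_modifier_chain_py_alt raw_text
      = (pvGo raw_text.toList 0 0).2.map (fun s => String.ofList (PySem.Chars.strip s)) := by
    simp only [split_modifier_chain_py_alt]
    rw [pvBCuts_go]
    simp only [zero_add]
    set G := pvGo raw_text.toList 0 0 with hG
    rw [show raw_text.toList = G.1 ++ G.2.flatten from pvGo_decomp raw_text.toList 0 0]
    have hs := congrArg (List.map (fun s => String.ofList (PySem.Chars.strip s)))
      (pvSlices G.2 G.1)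
    simp only [List.map_map] at hs
    exact hs
  rw [hA, hB, List.map_map]
  rfl
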